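-- pv_equiv track=rewrite | github.com/numworks/epsilon | tools/device/elf_size_tree.py | find_at_depth_zero
-- ===== SOURCE A (Python) =====
-- def find_at_depth_zero(s, start, substring):
--     """
--     Find the first occurrence of `substring` at depth zero in `s` starting from `start`.
--     Depth zero means no nested parentheses or brackets.
--     """
--     depth = 0
--     i = start
--
--     while i < len(s):
--         if depth == 0 and s.startswith(substring, i):
--             return i
--
--         if s[i] == "(" or s[i] == "{" or s[i] == "[" or s[i] == "<":
--             depth += 1
--         elif s[i] == ")" or s[i] == "}" or s[i] == "]" or s[i] == ">":
--             depth -= 1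
--
--         i += 1
--
--     return None
-- ===== SOURCE B (Python) =====
-- def find_at_depth_zero(s, start, substring):
--     n = len(s)
--     depths = {}
--     depth = 0
--     i = start
--     while i < n:
--         depths[i] = depth
--         c = s[i]
--         if c in "([{<":
--             depth += 1
--         elif c in ")]}>":
--             depth -= 1
--         i += 1
--     i = start
--     while i < n:
--         if depths[i] == 0 and s.startswith(substring, i):
--             return i
--         i += 1
--     return None
-- ===== Notes on version B (the rewrite author's own statement) =====
-- stated objective: alternative
-- what changed: A's single interleaved scan (depth bookkeeping and match test in one loop) is split into two passes: a first pass that records the paren-depth before every position into a table, then a separate scan returning the first position with recorded depth 0 where the substring matches.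
-- outside the precondition, e.g. on find_at_depth_zero('ab', -5, 'a'): A returns -5, B raises IndexError
import Mathlib
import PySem

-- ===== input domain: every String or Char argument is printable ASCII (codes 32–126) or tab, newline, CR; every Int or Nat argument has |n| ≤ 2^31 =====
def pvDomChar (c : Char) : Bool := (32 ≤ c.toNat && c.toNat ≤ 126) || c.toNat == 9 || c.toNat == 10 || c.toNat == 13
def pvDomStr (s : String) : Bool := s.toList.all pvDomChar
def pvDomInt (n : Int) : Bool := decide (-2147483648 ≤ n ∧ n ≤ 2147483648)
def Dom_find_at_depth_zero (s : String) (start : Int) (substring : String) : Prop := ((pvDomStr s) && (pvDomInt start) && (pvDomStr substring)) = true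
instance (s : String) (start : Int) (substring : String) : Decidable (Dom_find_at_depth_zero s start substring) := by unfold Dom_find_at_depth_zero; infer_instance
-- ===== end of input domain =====

-- B replaces A's single interleaved scan by two passes — a depth-profile table built first,
-- then a separate match scan over it (objective: alternative decomposition, same cost).

-- ===== PORT A =====
-- s.startswith(substring, i): exact for the offsets both programs reach (i < len(s));
-- a negative i clamps to max(0, len+i) exactly as clampIdx does.
def pvSW (s : List Char) (p : List Char) (i : Int) : Bool :=
  PySem.Chars.startswith (s.drop (PySem.List.clampIdx s.length i)) p

-- the if/elif chain updating `depth` in A's loop, in A's branch order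
def pvUpdA (c : Char) (d : Int) : Int :=
  if c = '(' ∨ c = '{' ∨ c = '[' ∨ c = '<' then d + 1
  else if c = ')' ∨ c = '}' ∨ c = ']' ∨ c = '>' then d - 1
  else d

-- A's while-loop: state (i, depth); s[i] = none is Python's IndexError (outside Pre_)
def pvLoopA (s : List Char) (sub : List Char) (i : Int) (depth : Int) : Option Int :=
  if _h : i < (s.length : Int) then
    if depth = 0 ∧ pvSW s sub i then some i
    else
      match PySem.List.pyGet? s i with
      | none => none  -- IndexError
      | some c => pvLoopA s sub (i + 1) (pvUpdA c depth)
  else none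
termination_by ((s.length : Int) - i).toNat
decreasing_by omega

def find_at_depth_zero (s : String) (start : Int) (substring : String) : Option Int :=
  pvLoopA s.toList substring.toList start 0

-- ===== PORT B =====
-- B's update: membership tests `c in "([{<"` / `c in ")]}>"`
def pvUpdB (c : Char) (d : Int) : Int :=
  if "([{<".toList.contains c then d + 1
  else if ")]}>".toList.contains c then d - 1
  else d

-- B's first pass: depths[i] = depth before consuming s[i]; s[i] = none is IndexError
def pvBuild (s : List Char) (i : Int) (depth : Int) (acc : PySem.Dict Int Int) :
    Option (PySem.Dict Int Int) :=
  if _h : i < (s.length : Int) then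
    let acc' := acc.insert i depth
    match PySem.List.pyGet? s i with
    | none => none  -- IndexError
    | some c => pvBuild s (i + 1) (pvUpdB c depth) acc'
  else some acc
termination_by ((s.length : Int) - i).toNat
decreasing_by omega

-- B's second pass: first i with depths[i] == 0 and s.startswith(substring, i)
-- (the key i is always present for start ≤ i < len(s), so the default 0 is never read)
def pvScan (s : List Char) (sub : List Char) (depths : PySem.Dict Int Int) (i : Int) :
    Option Int :=
  if _h : i < (s.length : Int) then
    if depths.getD i 0 = 0 ∧ pvSW s sub i then some i
    else pvScan s sub depths (i + 1)
  else none
termination_by ((s.length : Int) - i).toNat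
decreasing_by omega

def find_at_depth_zero_alt (s : String) (start : Int) (substring : String) : Option Int :=
  match pvBuild s.toList start 0 PySem.Dict.empty with
  | none => none
  | some depths => pvScan s.toList substring.toList depths start

-- ===== PRECONDITION & SPEC =====
-- Pre_ excludes start < -len(s): there A's negative-index wraparound either raises
-- IndexError or (when substring is a prefix of s) accidentally returns the negative
-- start via startswith clamping, while B's first pass raises IndexError.
def Pre_find_at_depth_zero (s : String) (start : Int) (substring : String) : Prop :=
  -(s.toList.length : Int) ≤ start
instance (s : String) (start : Int) (substring : String) : Decidable (Pre_find_at_depth_zero s start substring) := by unfold Pre_find_at_depth_zero; infer_instance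

def pvWitness_find_at_depth_zero : String × Int × String := ("a(b)b", 0, "b")

def Spec_find_at_depth_zero (s : String) (start : Int) (substring : String) (out : Option Int) : Prop := out = find_at_depth_zero_alt s start substring
instance (s : String) (start : Int) (substring : String) (out : Option Int) : Decidable (Spec_find_at_depth_zero s start substring out) := by unfold Spec_find_at_depth_zero; infer_instance

-- ===== CLAIM (what is proved, stated in full; the proofs are below) =====
def Claim_equal_find_at_depth_zero : Prop := ∀ (s : String) (start : Int) (substring : String), Dom_find_at_depth_zero s start substring → Pre_find_at_depth_zero s start substring → Spec_find_at_depth_zero s start substring (find_at_depth_zero s start substring)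

-- ===== LEMMAS AND PROOFS =====

theorem pvUpd_eq (c : Char) (d : Int) : pvUpdB c d = pvUpdA c d := by
  simp only [pvUpdB, pvUpdA]
  have h1 : "([{<".toList = ['(', '[', '{', '<'] := by decide
  have h2 : ")]}>".toList = [')', ']', '}', '>'] := by decide
  rw [h1, h2]
  simp only [List.contains_cons, List.contains_nil, Bool.or_false, Bool.or_eq_true,
    beq_iff_eq]
  split_ifs <;> first | rfl | tauto

theorem pvBuild_some (s : List Char) (i depth : Int) (acc : PySem.Dict Int Int)
    (hi : -(s.length : Int) ≤ i) :
    ∃ d, pvBuild s i depth acc = some d := by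
  by_cases h : i < (s.length : Int)
  · have hg : ∃ c, PySem.List.pyGet? s i = some c := by
      rcases Option.eq_none_or_eq_some (PySem.List.pyGet? s i) with hn | hs
      · rw [PySem.List.pyGet?_eq_none_iff] at hn
        exact absurd ⟨hi, h⟩ hn
      · exact hs
    rcases hg with ⟨c, hc⟩
    rw [pvBuild]
    simp only [h, dif_pos, hc]
    exact pvBuild_some s (i + 1) (pvUpdB c depth) (acc.insert i depth) (by omega)
  · exact ⟨acc, by rw [pvBuild]; simp [h]⟩
termination_by ((s.length : Int) - i).toNat
decreasing_by omega

theorem pvBuild_preserve (s : List Char) (i depth : Int) (acc d : PySem.Dict Int Int)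
    (hbl : pvBuild s i depth acc = some d) (j : Int) (hj : j < i) :
    d.get? j = acc.get? j := by
  rw [pvBuild] at hbl
  by_cases h : i < (s.length : Int)
  · simp only [h, dif_pos] at hbl
    cases hc : PySem.List.pyGet? s i with
    | none => rw [hc] at hbl; simp at hbl
    | some c =>
      rw [hc] at hbl
      have := pvBuild_preserve s (i + 1) (pvUpdB c depth) (acc.insert i depth) d hbl j (by omega)
      rw [this, PySem.Dict.get?_insert_of_ne _ _ (by omega)]
  · simp only [h, dif_neg, not_false_iff, Option.some.injEq] at hbl
    rw [← hbl]
termination_by ((s.length : Int) - i).toNat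
decreasing_by omega

theorem pvBuild_at (s : List Char) (i depth : Int) (acc d : PySem.Dict Int Int)
    (h : i < (s.length : Int))
    (hc : ∃ c, PySem.List.pyGet? s i = some c)
    (hbl : pvBuild s i depth acc = some d) :
    d.get? i = some depth := by
  rcases hc with ⟨c, hc⟩
  rw [pvBuild] at hbl
  simp only [h, dif_pos, hc] at hbl
  have := pvBuild_preserve s (i + 1) (pvUpdB c depth) (acc.insert i depth) d hbl i (by omega)
  rw [this, PySem.Dict.get?_insert_self]

theorem pvBuild_step (s : List Char) (i depth : Int) (acc d : PySem.Dict Int Int)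
    (hi : -(s.length : Int) ≤ i)
    (hbl : pvBuild s i depth acc = some d) :
    ∀ j : Int, i ≤ j → j + 1 < (s.length : Int) →
      ∀ c, PySem.List.pyGet? s j = some c →
        d.getD (j + 1) 0 = pvUpdA c (d.getD j 0) := by
  intro j hij hj1 c hcj
  by_cases h : i < (s.length : Int)
  · have hg : ∃ c', PySem.List.pyGet? s i = some c' := by
      rcases Option.eq_none_or_eq_some (PySem.List.pyGet? s i) with hn | hs
      · rw [PySem.List.pyGet?_eq_none_iff] at hn; exact absurd ⟨hi, h⟩ hn
      · exact hs
    rcases hg with ⟨ci, hci⟩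
    by_cases hji : j = i
    · subst hji
      have hcc : c = ci := (Option.some.inj (hci.symm.trans hcj)).symm
      subst hcc
      rw [pvBuild] at hbl
      simp only [h, dif_pos, hcj] at hbl
      have hat : d.get? (j + 1) = some (pvUpdB c depth) := by
        by_cases h1 : j + 1 < (s.length : Int)
        · have hg1 : ∃ c1, PySem.List.pyGet? s (j + 1) = some c1 := by
            rcases Option.eq_none_or_eq_some (PySem.List.pyGet? s (j + 1)) with hn | hs
            · rw [PySem.List.pyGet?_eq_none_iff] at hn
              exact absurd ⟨by omega, h1⟩ hn
            · exact hs
          exact pvBuild_at s (j + 1) (pvUpdB c depth) _ d h1 hg1 hbl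
        · omega
      have hhere : d.get? j = some depth := by
        have := pvBuild_preserve s (j + 1) (pvUpdB c depth) _ d hbl j (by omega)
        rw [this, PySem.Dict.get?_insert_self]
      rw [PySem.Dict.getD_eq_get?_getD, PySem.Dict.getD_eq_get?_getD, hat, hhere]
      simp [pvUpd_eq]
    · rw [pvBuild] at hbl
      simp only [h, dif_pos, hci] at hbl
      exact pvBuild_step s (i + 1) (pvUpdB ci depth) _ d (by omega) hbl j (by omega) hj1 c hcj
  · omega
termination_by ((s.length : Int) - i).toNat
decreasing_by omega

theorem pvScan_eq_loopA (s sub : List Char) (d : PySem.Dict Int Int) (i dep : Int)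
    (hi : -(s.length : Int) ≤ i)
    (hdep : i < (s.length : Int) → d.getD i 0 = dep)
    (hstep : ∀ j : Int, i ≤ j → j + 1 < (s.length : Int) →
      ∀ c, PySem.List.pyGet? s j = some c →
        d.getD (j + 1) 0 = pvUpdA c (d.getD j 0)) :
    pvScan s sub d i = pvLoopA s sub i dep := by
  rw [pvScan, pvLoopA]
  by_cases h : i < (s.length : Int)
  · have hg : ∃ c, PySem.List.pyGet? s i = some c := by
      rcases Option.eq_none_or_eq_some (PySem.List.pyGet? s i) with hn | hs
      · rw [PySem.List.pyGet?_eq_none_iff] at hn; exact absurd ⟨hi, h⟩ hn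
      · exact hs
    rcases hg with ⟨c, hc⟩
    simp only [h, dif_pos, hdep h, hc]
    by_cases hz : dep = 0 ∧ pvSW s sub i = true
    · simp [hz]
    · simp only [if_neg hz]
      exact pvScan_eq_loopA s sub d (i + 1) (pvUpdA c dep) (by omega)
        (fun h1 => by rw [hstep i le_rfl h1 c hc, hdep h])
        (fun j hj => hstep j (by omega))
  · simp [h]
termination_by ((s.length : Int) - i).toNat
decreasing_by omega

-- ===== VERDICT (by name: the statement is the Claim_ definition above) =====
theorem find_at_depth_zero_spec : Claim_equal_find_at_depth_zero := by
  intro s start substring _hdom hpre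
  unfold Spec_find_at_depth_zero find_at_depth_zero find_at_depth_zero_alt
  have hpre' : -(s.toList.length : Int) ≤ start := hpre
  rcases pvBuild_some s.toList start 0 PySem.Dict.empty hpre' with ⟨d, hd⟩
  rw [hd]
  refine (pvScan_eq_loopA s.toList substring.toList d start 0 hpre' ?_ ?_).symm
  · intro h
    rw [PySem.Dict.getD_eq_get?_getD,
      pvBuild_at s.toList start 0 PySem.Dict.empty d h ?_ hd]
    · rfl
    · rcases Option.eq_none_or_eq_some (PySem.List.pyGet? s.toList start) with hn | hs
      · rw [PySem.List.pyGet?_eq_none_iff] at hn; exact absurd ⟨hpre', h⟩ hn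
      · exact hs
  · exact pvBuild_step s.toList start 0 PySem.Dict.empty d hpre' hd
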